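-- pv_equiv track=rewrite | github.com/tuananhblue1022/NguyenTuanAnh_N21DCDT005 | Buoi09_ThucHanh/Chuong02/Bai16.py | Dao
-- ===== SOURCE A (Python) =====
-- def Dao(matrix):
--     n = len(matrix)
--     areas = []
--     for i in range(n):
--         temp = [0] * n
--         for j in range(i, n):
--             temp = [temp[k] + matrix[j][k] for k in range(n)]
--             area = (j - i + 1) * max(temp)
--             areas.append(area)
--     return max(areas)
-- ===== SOURCE B (Python) =====
-- def Dao(matrix):
--     n = len(matrix)
--     P = [[0] * n]
--     for row in matrix:
--         last = P[-1]
--         P.append([last[k] + row[k] for k in range(n)])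
--     return max((j - i + 1) * max(P[j + 1][k] - P[i][k] for k in range(n))
--                for i in range(n) for j in range(i, n))
-- ===== Notes on version B (the rewrite author's own statement) =====
-- stated objective: alternative
-- what changed: B precomputes a row prefix-sum table once and derives every range's column sums as P[j+1][k]-P[i][k], replacing A's per-i running accumulator that is rebuilt row by row inside the pair loop.
-- outside the precondition, e.g. on Dao([]): A raises ValueError, B raises ValueError
import Mathlib
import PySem

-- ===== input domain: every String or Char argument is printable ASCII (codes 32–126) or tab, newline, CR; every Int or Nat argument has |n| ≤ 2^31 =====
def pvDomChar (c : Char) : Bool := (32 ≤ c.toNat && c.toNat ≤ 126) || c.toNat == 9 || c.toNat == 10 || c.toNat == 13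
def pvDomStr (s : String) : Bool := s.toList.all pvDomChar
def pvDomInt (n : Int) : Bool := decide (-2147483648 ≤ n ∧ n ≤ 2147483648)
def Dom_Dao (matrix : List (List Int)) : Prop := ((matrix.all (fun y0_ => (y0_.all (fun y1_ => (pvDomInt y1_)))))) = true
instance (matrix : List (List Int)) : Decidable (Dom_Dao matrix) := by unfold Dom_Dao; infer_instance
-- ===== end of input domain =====

-- B replaces A's per-i running column accumulator by a row prefix-sum table built once,
-- reading each range's column sums as P[j+1][k] - P[i][k] (alternative decomposition, same cost).

-- ===== PORT A =====
-- Literal port of Source A. Indexing uses pyGetD with a default: Pre_Dao guarantees every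
-- index A evaluates is in range and every max() argument nonempty, so a default is never the result.
def Dao (matrix : List (List Int)) : Int :=
  let n : Int := matrix.length
  let areas : List Int :=
    (PySem.List.pyRange 0 n 1).foldl (fun areas i =>
      ((PySem.List.pyRange i n 1).foldl (fun (st : List Int × List Int) j =>
          let temp := (PySem.List.pyRange 0 n 1).map (fun k =>
            PySem.List.pyGetD st.1 k 0 + PySem.List.pyGetD (PySem.List.pyGetD matrix j []) k 0)
          (temp, st.2 ++ [(j - i + 1) * (PySem.List.max? temp id).getD 0]))
        (List.replicate matrix.length 0, areas)).2) []
  (PySem.List.max? areas id).getD 0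

-- ===== PORT B =====
-- Literal port of Source B (prefix-sum table P, then max over all (i, j) pairs of differences).
def Dao_alt (matrix : List (List Int)) : Int :=
  let n : Int := matrix.length
  let P : List (List Int) :=
    matrix.foldl (fun P row =>
      P ++ [(PySem.List.pyRange 0 n 1).map (fun k =>
        PySem.List.pyGetD (PySem.List.pyGetD P (-1) []) k 0 + PySem.List.pyGetD row k 0)])
      [List.replicate matrix.length 0]
  let cands : List Int :=
    (PySem.List.pyRange 0 n 1).flatMap (fun i =>
      (PySem.List.pyRange i n 1).map (fun j =>
        (j - i + 1) * (PySem.List.max? ((PySem.List.pyRange 0 n 1).map (fun k =>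
          PySem.List.pyGetD (PySem.List.pyGetD P (j + 1) []) k 0
          - PySem.List.pyGetD (PySem.List.pyGetD P i []) k 0)) id).getD 0))
  (PySem.List.max? cands id).getD 0

-- ===== PRECONDITION & SPEC =====
-- Pre_ excludes exactly the inputs where Python A raises: the empty matrix (max([]) → ValueError)
-- and matrices with a row shorter than len(matrix) (IndexError); Python B raises there too.
def Pre_Dao (matrix : List (List Int)) : Prop :=
  matrix ≠ [] ∧ ∀ row ∈ matrix, matrix.length ≤ row.length
instance (matrix : List (List Int)) : Decidable (Pre_Dao matrix) := by unfold Pre_Dao; infer_instance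

def pvWitness_Dao : List (List Int) := [[1, -2], [3, 4]]

def Spec_Dao (matrix : List (List Int)) (out : Int) : Prop := out = Dao_alt matrix
instance (matrix : List (List Int)) (out : Int) : Decidable (Spec_Dao matrix out) := by unfold Spec_Dao; infer_instance

-- ===== CLAIM (what is proved, stated in full; the proofs are below) =====
def Claim_equal_Dao : Prop := ∀ (matrix : List (List Int)), Dom_Dao matrix → Pre_Dao matrix → Spec_Dao matrix (Dao matrix)

-- ===== LEMMAS AND PROOFS =====

-- column sum of a block of rows (row.getD k 0 matches the ports' pyGetD row ↑k 0)
def colSum (rows : List (List Int)) (k : Nat) : Int := (rows.map (fun row => row.getD k 0)).sum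

-- the vector of the n column sums of a block of rows
def colF (n : Nat) (rows : List (List Int)) : List Int := (List.range n).map (fun k => colSum rows k)

-- the area candidate both programs produce for the row range [i..j]
def area (matrix : List (List Int)) (i j : Nat) : Int :=
  ((j : Int) - (i : Int) + 1) *
    (PySem.List.max? (colF matrix.length ((matrix.drop i).take (j + 1 - i))) id).getD 0

-- the list of candidates one outer iteration i contributes (common to both proofs)
def gArea (matrix : List (List Int)) (i : Int) : List Int :=
  (List.range (matrix.length - i.toNat)).map (fun t => area matrix i.toNat (i.toNat + t))

-- A's inner-loop body; B's table-building step
def stepA (matrix : List (List Int)) (i : Int) (st : List Int × List Int) (j : Int) :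
    List Int × List Int :=
  let temp := (PySem.List.pyRange 0 (matrix.length : Int) 1).map (fun k =>
    PySem.List.pyGetD st.1 k 0 + PySem.List.pyGetD (PySem.List.pyGetD matrix j []) k 0)
  (temp, st.2 ++ [(j - i + 1) * (PySem.List.max? temp id).getD 0])

def stepB (n : Int) (P : List (List Int)) (row : List Int) : List (List Int) :=
  P ++ [(PySem.List.pyRange 0 n 1).map (fun k =>
    PySem.List.pyGetD (PySem.List.pyGetD P (-1) []) k 0 + PySem.List.pyGetD row k 0)]

theorem colF_nil (n : Nat) : colF n [] = List.replicate n 0 := by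
  simp [colF, colSum, List.map_const']

-- the comprehension both Pythons share: adding one row to a column-sum vector
theorem addRow_step (n : Nat) (rows : List (List Int)) (row : List Int) :
    (PySem.List.pyRange 0 (n : Int) 1).map (fun k =>
        PySem.List.pyGetD (colF n rows) k 0 + PySem.List.pyGetD row k 0)
      = colF n (rows ++ [row]) := by
  rw [PySem.List.pyRange_zero_nat, List.map_map, colF]
  refine List.map_congr_left ?_
  intro k hk
  rw [List.mem_range] at hk
  simp only [Function.comp, PySem.List.pyGetD_natCast,
    PySem.List.getD_map_range (fun k => colSum rows k) n k 0 hk]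
  simp [colSum]

theorem pyGetD_append_neg_one {α : Type} (L : List α) (t : α) (d : α) :
    PySem.List.pyGetD (L ++ [t]) (-1) d = t := by
  simp [PySem.List.pyGetD]

theorem pyGetD_map_range_lt {β : Type} (f : Nat → β) (m i : Nat) (d : β) (h : i < m) :
    PySem.List.pyGetD ((List.range m).map f) (i : Int) d = f i := by
  rw [PySem.List.pyGetD_natCast, PySem.List.getD_map_range f m i d h]

theorem innerA (matrix : List (List Int)) (i : Nat) (as : List Int) :
    ∀ (d : Nat), i + d ≤ matrix.length →
    (PySem.List.pyRange (i : Int) ((i : Int) + (d : Int)) 1).foldl (stepA matrix (i : Int))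
      (colF matrix.length [], as)
    = (colF matrix.length ((matrix.drop i).take d),
       as ++ (List.range d).map (fun t => area matrix i (i + t))) := by
  intro d
  induction d with
  | zero => intro _; simp [PySem.List.pyRange_one_eq_nil (le_refl (i : Int))]
  | succ d ih =>
    intro h
    have hd : i + d ≤ matrix.length := by omega
    have hcast : (i : Int) + ((d : Nat) + 1 : Nat) = ((i : Int) + (d : Int)) + 1 := by push_cast; ring
    rw [hcast, PySem.List.pyRange_one_succ_right (by omega), List.foldl_append, ih hd]
    simp only [List.foldl_cons, List.foldl_nil]
    have hj : (i : Int) + (d : Int) = ((i + d : Nat) : Int) := by push_cast; ring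
    have hget : PySem.List.pyGetD matrix ((i : Int) + (d : Int)) [] = matrix.getD (i + d) [] := by
      rw [hj, PySem.List.pyGetD_natCast]
    have htake : (matrix.drop i).take d ++ [matrix.getD (i + d) []] = (matrix.drop i).take (d + 1) := by
      have hlt : i + d < matrix.length := by omega
      rw [List.take_add_one]
      have : (matrix.drop i)[d]? = some matrix[i + d] := by
        rw [List.getElem?_drop]
        exact List.getElem?_eq_getElem hlt
      rw [this]
      simp [List.getD, List.getElem?_eq_getElem hlt]
    simp only [stepA, hget, addRow_step matrix.length ((matrix.drop i).take d) (matrix.getD (i + d) []), htake]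
    rw [Prod.mk.injEq]
    refine ⟨rfl, ?_⟩
    rw [List.range_succ, List.map_append, ← List.append_assoc]
    congr 1
    simp only [List.map_cons, List.map_nil]
    congr 1
    simp only [area]
    rw [show i + d + 1 - i = d + 1 from by omega]
    push_cast
    ring_nf

theorem outerA_body (matrix : List (List Int)) (acc : List Int) (i : Int)
    (h0 : 0 ≤ i) (h1 : i < (matrix.length : Int)) :
    (List.foldl (stepA matrix i) (List.replicate matrix.length 0, acc)
      (PySem.List.pyRange i (matrix.length : Int) 1)).2 = acc ++ gArea matrix i := by
  have hi' : i = ((i.toNat : Nat) : Int) := by omega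
  rw [hi', ← colF_nil matrix.length]
  have hlen : (matrix.length : Int) = ((i.toNat : Nat) : Int) + ((matrix.length - i.toNat : Nat) : Int) := by
    omega
  conv_lhs => rw [hlen]
  rw [innerA matrix i.toNat acc (matrix.length - i.toNat) (by omega)]
  simp only [gArea, Int.toNat_natCast]

theorem Dao_eq_flat (matrix : List (List Int)) :
    Dao matrix = (PySem.List.max?
      ((PySem.List.pyRange 0 (matrix.length : Int) 1).flatMap (gArea matrix)) id).getD 0 := by
  simp only [Dao]
  congr 1
  rw [PySem.List.foldl_congr_mem _ _
      (fun areas i => areas ++ gArea matrix i) _ ?_]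
  · rw [PySem.List.foldl_append_eq_flatMap, List.nil_append]
  · intro acc i hi
    rw [PySem.List.mem_pyRange_one] at hi
    exact outerA_body matrix acc i hi.1 hi.2

theorem Pchar (n : Nat) :
    ∀ (rows L pre : List (List Int)),
    rows.foldl (stepB (n : Int)) (L ++ [colF n pre])
      = (L ++ [colF n pre]) ++ (List.range rows.length).map (fun t => colF n (pre ++ rows.take (t + 1))) := by
  intro rows
  induction rows with
  | nil => intro L pre; simp
  | cons row rs ih =>
    intro L pre
    rw [List.foldl_cons]
    have hstep : stepB (n : Int) (L ++ [colF n pre]) row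
        = (L ++ [colF n pre]) ++ [colF n (pre ++ [row])] := by
      rw [stepB, pyGetD_append_neg_one, addRow_step]
    rw [hstep, List.append_assoc L [colF n pre] [colF n (pre ++ [row])]]
    rw [show (L ++ ([colF n pre] ++ [colF n (pre ++ [row])]))
        = (L ++ [colF n pre]) ++ [colF n (pre ++ [row])] from by simp]
    rw [ih (L ++ [colF n pre]) (pre ++ [row])]
    rw [List.length_cons, List.range_succ_eq_map, List.map_cons, List.map_map]
    rw [List.append_assoc]
    congr 1
    rw [show (row :: rs).take (0 + 1) = [row] from rfl]
    rw [List.singleton_append]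
    congr 1
    refine List.map_congr_left ?_
    intro t _
    simp only [Function.comp]
    congr 1
    rw [show (row :: rs).take (t + 1 + 1) = row :: rs.take (t + 1) from rfl]
    simp

theorem Pmap (n : Nat) (matrix : List (List Int)) :
    matrix.foldl (stepB (n : Int)) [colF n []]
      = (List.range (matrix.length + 1)).map (fun r => colF n (matrix.take r)) := by
  have h := Pchar n matrix [] []
  simp only [List.nil_append] at h
  rw [h, List.range_succ_eq_map, List.map_cons, List.map_map]
  simp [Function.comp]

theorem sub_step (n : Nat) (matrix : List (List Int)) (i r : Nat) (hir : i ≤ r) :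
    (PySem.List.pyRange 0 (n : Int) 1).map (fun k =>
        PySem.List.pyGetD (colF n (matrix.take r)) k 0 - PySem.List.pyGetD (colF n (matrix.take i)) k 0)
      = colF n ((matrix.drop i).take (r - i)) := by
  rw [PySem.List.pyRange_zero_nat, List.map_map, colF]
  refine List.map_congr_left ?_
  intro k hk
  rw [List.mem_range] at hk
  simp only [Function.comp, colF, PySem.List.pyGetD_natCast,
    PySem.List.getD_map_range (fun k => colSum (matrix.take r) k) n k 0 hk,
    PySem.List.getD_map_range (fun k => colSum (matrix.take i) k) n k 0 hk]
  have : matrix.take r = matrix.take i ++ (matrix.drop i).take (r - i) := by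
    rw [← List.take_add]
    congr 1
    omega
  rw [this]
  simp [colSum]

theorem outerB_body (matrix : List (List Int)) (i : Int)
    (h0 : 0 ≤ i) (h1 : i < (matrix.length : Int)) :
    (PySem.List.pyRange i (matrix.length : Int) 1).map (fun j =>
        (j - i + 1) * (PySem.List.max? ((PySem.List.pyRange 0 (matrix.length : Int) 1).map (fun k =>
          PySem.List.pyGetD (PySem.List.pyGetD
            ((List.range (matrix.length + 1)).map (fun r => colF matrix.length (matrix.take r))) (j + 1) []) k 0
          - PySem.List.pyGetD (PySem.List.pyGetD
            ((List.range (matrix.length + 1)).map (fun r => colF matrix.length (matrix.take r))) i []) k 0)) id).getD 0)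
      = gArea matrix i := by
  have hi' : i = ((i.toNat : Nat) : Int) := by omega
  rw [PySem.List.pyRange_one i (matrix.length : Int), List.map_map, gArea]
  rw [show ((matrix.length : Int) - i).toNat = matrix.length - i.toNat from by omega]
  refine List.map_congr_left ?_
  intro t ht
  rw [List.mem_range] at ht
  simp only [Function.comp]
  have hj1 : i + (t : Int) + 1 = ((i.toNat + t + 1 : Nat) : Int) := by omega
  rw [hj1, pyGetD_map_range_lt _ _ _ _ (by omega)]
  conv_lhs => rw [hi', pyGetD_map_range_lt _ _ _ _ (by omega : i.toNat < matrix.length + 1)]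
  simp only [Int.toNat_natCast]
  rw [sub_step matrix.length matrix i.toNat (i.toNat + t + 1) (by omega)]
  rw [show i.toNat + t + 1 - i.toNat = t + 1 from by omega]
  simp only [area]
  rw [show i.toNat + t + 1 - i.toNat = t + 1 from by omega]
  push_cast
  ring_nf

theorem Dao_alt_eq_flat (matrix : List (List Int)) :
    Dao_alt matrix = (PySem.List.max?
      ((PySem.List.pyRange 0 (matrix.length : Int) 1).flatMap (gArea matrix)) id).getD 0 := by
  simp only [Dao_alt]
  rw [← colF_nil]
  rw [show matrix.foldl (fun P row =>
      P ++ [(PySem.List.pyRange 0 (matrix.length : Int) 1).map (fun k =>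
        PySem.List.pyGetD (PySem.List.pyGetD P (-1) []) k 0 + PySem.List.pyGetD row k 0)])
      [colF matrix.length []] = matrix.foldl (stepB (matrix.length : Int)) [colF matrix.length []] from rfl]
  rw [Pmap]
  congr 2
  refine List.flatMap_congr ?_
  intro i hi
  rw [PySem.List.mem_pyRange_one] at hi
  exact outerB_body matrix i hi.1 hi.2

theorem Dao_spec : Claim_equal_Dao := by
  intro matrix _ _
  unfold Spec_Dao
  rw [Dao_eq_flat, Dao_alt_eq_flat]
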